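-- pv_equiv track=rewrite | github.com/MSandovalM/myadvento2025 | 4.py | uptade_roll_map
-- ===== SOURCE A (Python) =====
-- def uptade_roll_map(moved_coor:list[tuple], base_map: str)-> str:
--     splited_map = base_map.splitlines()
--     new_map = ""
--
--     for row, line in enumerate(splited_map):
--         new_line = ""
--         for col, char in enumerate(line):
--
--             if (row, col) in moved_coor:
--                 new_line += "."
--             else:
--                 new_line += char
--         new_map += new_line + "\n"
--
--     return new_map
-- ===== SOURCE B (Python) =====
-- def uptade_roll_map(moved_coor: list[tuple], base_map: str) -> str:
--     grid = [list(line) for line in base_map.splitlines()]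
--     for row, col in moved_coor:
--         if 0 <= row < len(grid) and 0 <= col < len(grid[row]):
--             grid[row][col] = "."
--     return "".join("".join(r) + "\n" for r in grid)
-- ===== Notes on version B (the rewrite author's own statement) =====
-- stated objective: faster
-- what changed: Instead of scanning every grid cell and testing (row,col) membership in moved_coor, B splits the map into a mutable grid of char lists, writes '.' directly at each in-range coordinate in one pass over moved_coor, and joins the rows back.
import Mathlib
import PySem

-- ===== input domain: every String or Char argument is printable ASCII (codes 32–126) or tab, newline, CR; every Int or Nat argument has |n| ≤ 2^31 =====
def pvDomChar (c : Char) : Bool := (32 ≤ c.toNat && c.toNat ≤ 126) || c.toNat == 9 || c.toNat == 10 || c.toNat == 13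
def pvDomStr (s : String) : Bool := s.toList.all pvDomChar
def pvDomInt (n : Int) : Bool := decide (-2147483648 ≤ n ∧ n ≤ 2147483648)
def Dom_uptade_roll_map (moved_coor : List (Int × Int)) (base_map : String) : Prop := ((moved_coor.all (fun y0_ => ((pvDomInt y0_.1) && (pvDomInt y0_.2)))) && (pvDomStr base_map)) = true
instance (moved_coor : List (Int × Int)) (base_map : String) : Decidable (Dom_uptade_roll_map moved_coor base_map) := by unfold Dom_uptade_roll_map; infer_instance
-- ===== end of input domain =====

-- B replaces A's per-cell membership scan by direct writes into a grid of char rows, one pass over moved_coor.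

-- ===== PORT A =====
-- literal transliteration of A; strings are handled as their char lists (String.ofList at the end)
def uptade_roll_map (moved_coor : List (Int × Int)) (base_map : String) : String :=
  let splited_map := (PySem.Str.splitlines base_map).map String.toList
  String.ofList <|
    (PySem.List.enumerate splited_map).foldl (fun new_map rl =>
      let new_line :=
        (PySem.List.enumerate rl.2).foldl (fun nl cc =>
          if moved_coor.contains (rl.1, cc.1) then nl ++ ['.'] else nl ++ [cc.2]) []
      new_map ++ new_line ++ ['\n']) []

-- ===== PORT B =====
def uptade_roll_map_alt (moved_coor : List (Int × Int)) (base_map : String) : String :=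
  let grid0 := (PySem.Str.splitlines base_map).map String.toList
  let grid := moved_coor.foldl (fun g rc =>
      if 0 ≤ rc.1 ∧ rc.1 < (g.length : Int) ∧ 0 ≤ rc.2 ∧ rc.2 < ((g.getD rc.1.toNat []).length : Int) then
        g.set rc.1.toNat ((g.getD rc.1.toNat []).set rc.2.toNat '.')
      else g) grid0
  String.ofList (grid.flatMap (fun r => r ++ ['\n']))

-- ===== PRECONDITION & SPEC =====
def Spec_uptade_roll_map (moved_coor : List (Int × Int)) (base_map : String) (out : String) : Prop := out = uptade_roll_map_alt moved_coor base_map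
instance (moved_coor : List (Int × Int)) (base_map : String) (out : String) : Decidable (Spec_uptade_roll_map moved_coor base_map out) := by unfold Spec_uptade_roll_map; infer_instance

-- ===== CLAIM (what is proved, stated in full; the proofs are below) =====
def Claim_equal_uptade_roll_map : Prop := ∀ (moved_coor : List (Int × Int)) (base_map : String), Dom_uptade_roll_map moved_coor base_map → Spec_uptade_roll_map moved_coor base_map (uptade_roll_map moved_coor base_map)

-- ===== LEMMAS AND PROOFS =====

-- B's fold step, named for the lemmas
def pvStep (g : List (List Char)) (rc : Int × Int) : List (List Char) :=
  if 0 ≤ rc.1 ∧ rc.1 < (g.length : Int) ∧ 0 ≤ rc.2 ∧ rc.2 < ((g.getD rc.1.toNat []).length : Int) then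
    g.set rc.1.toNat ((g.getD rc.1.toNat []).set rc.2.toNat '.')
  else g

lemma pvStep_length (g : List (List Char)) (rc : Int × Int) : (pvStep g rc).length = g.length := by
  unfold pvStep; split <;> simp

lemma pvStep_row_length (g : List (List Char)) (rc : Int × Int) (r : Nat) (hr : r < g.length) :
    ((pvStep g rc)[r]'(by rw [pvStep_length]; exact hr)).length = (g[r]'hr).length := by
  unfold pvStep
  split
  · by_cases h : rc.1.toNat = r
    · subst h
      simp [List.getD, List.getElem?_eq_getElem hr]
    · simp [h]
  · rfl

lemma pvFold_length (mc : List (Int × Int)) (g : List (List Char)) :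
    (mc.foldl pvStep g).length = g.length := by
  induction mc generalizing g with
  | nil => rfl
  | cons p mc ih => simpa [List.foldl_cons, pvStep_length] using ih (pvStep g p)

lemma pvFold_row_length (mc : List (Int × Int)) (g : List (List Char)) (r : Nat) (hr : r < g.length) :
    ((mc.foldl pvStep g)[r]'(by rw [pvFold_length]; exact hr)).length = (g[r]'hr).length := by
  induction mc generalizing g with
  | nil => rfl
  | cons p mc ih =>
      have h1 : r < (pvStep g p).length := by rw [pvStep_length]; exact hr
      have h2 := ih (pvStep g p) h1
      have h3 := pvStep_row_length g p r hr
      calc ((List.foldl pvStep g (p :: mc))[r]'_).length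
          = ((List.foldl pvStep (pvStep g p) mc)[r]'(by rw [pvFold_length]; exact h1)).length := rfl
        _ = ((pvStep g p)[r]'h1).length := h2
        _ = (g[r]'hr).length := h3

lemma pvStep_get (g : List (List Char)) (rc : Int × Int) (r c : Nat)
    (hr : r < g.length) (hc : c < (g[r]'hr).length) :
    ((pvStep g rc)[r]'(by rw [pvStep_length]; exact hr))[c]'(by rw [pvStep_row_length]; exact hc) =
      if rc = ((r : Int), (c : Int)) then '.' else (g[r]'hr)[c]'hc := by
  obtain ⟨a, b⟩ := rc
  unfold pvStep
  by_cases hcond : 0 ≤ a ∧ a < (g.length : Int) ∧ 0 ≤ b ∧ b < (((g.getD a.toNat [])).length : Int)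
  · have hga : a.toNat < g.length := by omega
    have hgd : g.getD a.toNat [] = g[a.toNat]'hga := by
      simp [List.getD, List.getElem?_eq_getElem hga]
    simp only [if_pos hcond]
    simp only [hgd]
    by_cases har : a.toNat = r
    · subst har
      by_cases hbc : b.toNat = c
      · subst hbc
        have hab : (a, b) = ((a.toNat : Int), (b.toNat : Int)) := by
          rw [Prod.mk.injEq]
          exact ⟨by omega, by omega⟩
        simp [hab]
      · have hab : ¬ ((a, b) = (((a.toNat) : Int), (c : Int))) := by
          rw [Prod.mk.injEq]
          omega
        simp only [List.getElem_set, if_true]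
        rw [if_neg hbc, if_neg hab]
    · have hab : ¬ ((a, b) = ((r : Int), (c : Int))) := by
        rw [Prod.mk.injEq]
        omega
      simp [har, hab]
  · simp only [if_neg hcond]
    have hab : ¬ ((a, b) = ((r : Int), (c : Int))) := by
      intro h
      rw [Prod.mk.injEq] at h
      obtain ⟨h1, h2⟩ := h
      subst h1; subst h2
      apply hcond
      have hgd : g.getD ((r : Int)).toNat [] = g[r]'hr := by
        simp [List.getD, List.getElem?_eq_getElem hr]
      refine ⟨by omega, by omega, by omega, ?_⟩
      rw [hgd]
      exact_mod_cast hc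
    simp [hab]

lemma pvFold_get (mc : List (Int × Int)) (g : List (List Char)) (r c : Nat)
    (hr : r < g.length) (hc : c < (g[r]'hr).length) :
    ((mc.foldl pvStep g)[r]'(by rw [pvFold_length]; exact hr))[c]'(by rw [pvFold_row_length]; exact hc) =
      if mc.contains ((r : Int), (c : Int)) then '.' else (g[r]'hr)[c]'hc := by
  induction mc generalizing g with
  | nil => simp
  | cons p mc ih =>
      have hr' : r < (pvStep g p).length := by rw [pvStep_length]; exact hr
      have hc' : c < ((pvStep g p)[r]'hr').length := by rw [pvStep_row_length]; exact hc
      have hstep := pvStep_get g p r c hr hc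
      have hih := ih (pvStep g p) hr' hc'
      calc ((List.foldl pvStep g (p :: mc))[r]'_)[c]'_
          = ((List.foldl pvStep (pvStep g p) mc)[r]'(by rw [pvFold_length]; exact hr'))[c]'(by rw [pvFold_row_length]; exact hc') := rfl
        _ = if mc.contains ((r : Int), (c : Int)) then '.' else ((pvStep g p)[r]'hr')[c]'hc' := hih
        _ = if (p :: mc).contains ((r : Int), (c : Int)) then '.' else (g[r]'hr)[c]'hc := by
            rw [hstep]
            by_cases hm : ((r : Int), (c : Int)) ∈ mc
            · simp [hm]
            · by_cases hp : p = ((r : Int), (c : Int))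
              · simp [hm, hp]
              · have hp' : ¬ (((r : Int), (c : Int)) = p) := fun h => hp h.symm
                simp [hm, hp, hp']

-- A's inner loop is a map over the enumerated line
lemma pvLineA (mc : List (Int × Int)) (row : Int) (line : List Char) :
    (PySem.List.enumerate line).foldl (fun nl cc =>
        if mc.contains (row, cc.1) then nl ++ ['.'] else nl ++ [cc.2]) [] =
      (PySem.List.enumerate line).map (fun cc => if mc.contains (row, cc.1) then '.' else cc.2) := by
  have h : ∀ (l : List (Int × Char)) (acc : List Char),
      l.foldl (fun nl cc => if mc.contains (row, cc.1) then nl ++ ['.'] else nl ++ [cc.2]) acc =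
        acc ++ l.map (fun cc => if mc.contains (row, cc.1) then '.' else cc.2) := by
    intro l
    induction l with
    | nil => simp
    | cons x xs ih =>
        intro acc
        rw [List.foldl_cons, ih, List.map_cons]
        by_cases hx : (row, x.1) ∈ mc <;> simp [hx]
  simpa using h (PySem.List.enumerate line) []

-- final grid of B, pointwise as a map over the enumerated rows
lemma pvGrid_eq (mc : List (Int × Int)) (L : List (List Char)) :
    mc.foldl pvStep L =
      (PySem.List.enumerate L).map (fun rl =>
        (PySem.List.enumerate rl.2).map (fun cc => if mc.contains (rl.1, cc.1) then '.' else cc.2)) := by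
  apply List.ext_getElem
  · simp [pvFold_length, PySem.List.length_enumerate]
  · intro r h1 h2
    have hr : r < L.length := by rw [pvFold_length] at h1; exact h1
    apply List.ext_getElem
    · rw [pvFold_row_length mc L r hr]
      simp [PySem.List.getElem_enumerate, PySem.List.length_enumerate]
    · intro c hc1 hc2
      have hc : c < (L[r]'hr).length := by rw [pvFold_row_length mc L r hr] at hc1; exact hc1
      rw [pvFold_get mc L r c hr hc]
      simp [PySem.List.getElem_enumerate]

-- the whole computation, at the level of char lists
lemma pvMain (mc : List (Int × Int)) (L : List (List Char)) :
    (PySem.List.enumerate L).foldl (fun new_map rl =>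
        new_map ++ ((PySem.List.enumerate rl.2).foldl (fun nl cc =>
          if mc.contains (rl.1, cc.1) then nl ++ ['.'] else nl ++ [cc.2]) []) ++ ['\n']) [] =
      (mc.foldl pvStep L).flatMap (fun r => r ++ ['\n']) := by
  have houter : ∀ (l : List (Int × List Char)) (acc : List Char),
      l.foldl (fun new_map rl =>
          new_map ++ ((PySem.List.enumerate rl.2).foldl (fun nl cc =>
            if mc.contains (rl.1, cc.1) then nl ++ ['.'] else nl ++ [cc.2]) []) ++ ['\n']) acc =
        acc ++ l.flatMap (fun rl =>
          (PySem.List.enumerate rl.2).map (fun cc => if mc.contains (rl.1, cc.1) then '.' else cc.2) ++ ['\n']) := by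
    intro l
    induction l with
    | nil => simp
    | cons x xs ih =>
        intro acc
        rw [List.foldl_cons, ih, pvLineA, List.flatMap_cons]
        simp
  rw [houter, pvGrid_eq mc L, List.flatMap_map]
  simp

-- ===== VERDICT (by name: the statement is the Claim_ definition above) =====
theorem uptade_roll_map_spec : Claim_equal_uptade_roll_map := by
  intro mc bm _
  unfold Spec_uptade_roll_map
  exact congrArg String.ofList (pvMain mc ((PySem.Str.splitlines bm).map String.toList))
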